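-- pv_equiv track=rewrite | github.com/cbsandeep10/reinforcement-learning-sudoku | checker.py | check_no_dups
-- ===== SOURCE A (Python) =====
-- def check_no_dups(nineGrouping):
--     uniqueDigits = set()
--     for num in nineGrouping:
--         if num != 0:
--             if num in uniqueDigits:
--                 return False
--         uniqueDigits.add(num)
--     return True
-- ===== SOURCE B (Python) =====
-- def check_no_dups(nineGrouping):
--     ordered = sorted(n for n in nineGrouping if n != 0)
--     return all(a != b for a, b in zip(ordered, ordered[1:]))
-- ===== Notes on version B (the rewrite author's own statement) =====
-- stated objective: alternative
-- what changed: Replaces the hash-set with per-element membership tests and early return by a sort of the nonzero digits followed by a single adjacent-pair scan; no set is used at all.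
import Mathlib
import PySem

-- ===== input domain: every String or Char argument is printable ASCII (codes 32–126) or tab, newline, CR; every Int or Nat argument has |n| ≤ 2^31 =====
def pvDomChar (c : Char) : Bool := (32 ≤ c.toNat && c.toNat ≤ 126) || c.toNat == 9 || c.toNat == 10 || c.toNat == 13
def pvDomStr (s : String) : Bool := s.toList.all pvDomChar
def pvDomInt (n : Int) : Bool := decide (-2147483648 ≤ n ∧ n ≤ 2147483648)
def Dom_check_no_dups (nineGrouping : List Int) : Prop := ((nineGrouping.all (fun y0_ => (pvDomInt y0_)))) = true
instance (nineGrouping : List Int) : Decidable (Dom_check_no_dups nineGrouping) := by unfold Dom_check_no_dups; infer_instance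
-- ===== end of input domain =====

-- B replaces A's running hash-set with membership early-return by sort-the-nonzeros then an adjacent-pair scan; objective: alternative algorithm.


-- ===== PORT A =====
def check_no_dups_loop : List Int → PySem.Set Int → Bool
  | [], _ => true
  | num :: rest, uniqueDigits =>
    if num ≠ 0 then
      if PySem.Set.contains uniqueDigits num then false
      else check_no_dups_loop rest (PySem.Set.add uniqueDigits num)
    else check_no_dups_loop rest (PySem.Set.add uniqueDigits num)

def check_no_dups (nineGrouping : List Int) : Bool :=
  check_no_dups_loop nineGrouping PySem.Set.empty

-- ===== PORT B =====
-- all(a != b for a, b in zip(ordered, ordered[1:]))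
def check_no_dups_adjAll : List Int → Bool
  | a :: b :: rest => a != b && check_no_dups_adjAll (b :: rest)
  | _ => true

def check_no_dups_alt (nineGrouping : List Int) : Bool :=
  let ordered := PySem.List.sorted (nineGrouping.filter (fun n => decide (n ≠ 0))) (fun x => x) false
  check_no_dups_adjAll ordered

-- ===== PRECONDITION & SPEC =====
def Spec_check_no_dups (nineGrouping : List Int) (out : Bool) : Prop := out = check_no_dups_alt nineGrouping
instance (nineGrouping : List Int) (out : Bool) : Decidable (Spec_check_no_dups nineGrouping out) := by unfold Spec_check_no_dups; infer_instance

-- ===== CLAIM (what is proved, stated in full; the proofs are below) =====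
def Claim_equal_check_no_dups : Prop := ∀ (nineGrouping : List Int), Dom_check_no_dups nineGrouping → Spec_check_no_dups nineGrouping (check_no_dups nineGrouping)

-- ===== LEMMAS AND PROOFS =====

-- A's loop returns true iff the nonzero elements are pairwise distinct and none is already in the accumulator
theorem loopA_eq_true_iff (xs : List Int) : ∀ (s : PySem.Set Int),
    check_no_dups_loop xs s = true ↔
      ((xs.filter (fun n => decide (n ≠ 0))).Nodup ∧ ∀ x ∈ xs, x ≠ 0 → x ∉ s) := by
  induction xs with
  | nil => intro s; simp [check_no_dups_loop]
  | cons x xs ih =>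
    intro s
    by_cases hx : x = 0
    · subst hx
      rw [show check_no_dups_loop (0 :: xs) s = check_no_dups_loop xs (PySem.Set.add s 0) by
        simp [check_no_dups_loop]]
      rw [ih]
      rw [List.filter_cons_of_neg (by simp)]
      constructor
      · rintro ⟨h1, h2⟩
        refine ⟨h1, ?_⟩
        intro y hy hy0
        rcases List.mem_cons.1 hy with hy | hy
        · exact absurd hy hy0
        · have := h2 y hy hy0
          rw [PySem.Set.mem_add] at this
          exact fun hmem => this (Or.inl hmem)
      · rintro ⟨h1, h2⟩
        refine ⟨h1, ?_⟩
        intro y hy hy0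
        rw [PySem.Set.mem_add]
        rintro (h | h)
        · exact h2 y (List.mem_cons_of_mem _ hy) hy0 h
        · exact hy0 h
    · by_cases hc : x ∈ s
      · rw [show check_no_dups_loop (x :: xs) s = false by
          simp [check_no_dups_loop, hx, hc]]
        simp only [Bool.false_eq_true, false_iff]
        rintro ⟨_, h2⟩
        exact h2 x (List.mem_cons_self) hx hc
      · rw [show check_no_dups_loop (x :: xs) s = check_no_dups_loop xs (PySem.Set.add s x) by
          simp [check_no_dups_loop, hx, hc]]
        rw [ih]
        rw [List.filter_cons_of_pos (by simpa using hx)]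
        rw [List.nodup_cons]
        constructor
        · rintro ⟨h1, h2⟩
          refine ⟨⟨?_, h1⟩, ?_⟩
          · intro hmem
            have hx' := List.mem_filter.1 hmem
            have := h2 x hx'.1 hx
            rw [PySem.Set.mem_add] at this
            exact this (Or.inr rfl)
          · intro y hy hy0
            rcases List.mem_cons.1 hy with hy | hy
            · subst hy; exact hc
            · have := h2 y hy hy0
              rw [PySem.Set.mem_add] at this
              exact fun hmem => this (Or.inl hmem)
        · rintro ⟨⟨h0, h1⟩, h2⟩
          refine ⟨h1, ?_⟩
          intro y hy hy0
          rw [PySem.Set.mem_add]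
          rintro (h | h)
          · exact h2 y (List.mem_cons_of_mem _ hy) hy0 h
          · subst h
            exact h0 (List.mem_filter.2 ⟨hy, by simpa using hy0⟩)

-- on a (≤)-sorted list the adjacent-pair scan decides Nodup
theorem adjAll_sorted_iff_nodup : ∀ (l : List Int), l.Pairwise (· ≤ ·) →
    (check_no_dups_adjAll l = true ↔ l.Nodup) := by
  intro l
  induction l with
  | nil => intro _; simp [check_no_dups_adjAll]
  | cons a t ih =>
    intro hp
    cases t with
    | nil => simp [check_no_dups_adjAll]
    | cons b r =>
      have hpt : (b :: r).Pairwise (· ≤ ·) := (List.pairwise_cons.mp hp).2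
      have hab : a ≤ b := (List.pairwise_cons.mp hp).1 b (List.mem_cons_self)
      rw [show check_no_dups_adjAll (a :: b :: r) = (a != b && check_no_dups_adjAll (b :: r)) from rfl]
      rw [Bool.and_eq_true, bne_iff_ne, ih hpt]
      constructor
      · rintro ⟨hne, hnd⟩
        rw [List.nodup_cons]
        refine ⟨?_, hnd⟩
        intro hmem
        rcases List.mem_cons.1 hmem with h | h
        · exact hne h
        · have hby : b ≤ a := (List.pairwise_cons.mp hpt).1 a h
          exact hne (le_antisymm hab hby)
      · intro hnd
        rcases List.nodup_cons.mp hnd with ⟨hnm, hnd'⟩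
        exact ⟨fun h => hnm (h ▸ List.mem_cons_self), hnd'⟩

-- ===== VERDICT (by name: the statement is the Claim_ definition above) =====
theorem check_no_dups_spec : Claim_equal_check_no_dups := by
  intro g _
  unfold Spec_check_no_dups check_no_dups check_no_dups_alt
  rw [Bool.eq_iff_iff]
  rw [loopA_eq_true_iff]
  rw [adjAll_sorted_iff_nodup _ (PySem.List.sorted_pairwise _ _)]
  rw [(PySem.List.sorted_perm _ _ _).nodup_iff]
  constructor
  · rintro ⟨h1, _⟩; exact h1
  · intro h1; exact ⟨h1, fun x _ _ h => by simp [PySem.Set.empty] at h⟩
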